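-- pv_equiv track=rewrite | github.com/omeleteCake/label-league | scripts/pipeline/scrape_listeners.py | _filter_artist_rows
-- ===== SOURCE A (Python) =====
-- from typing import Any
--
-- def _filter_artist_rows(
--     data: Any,
--     spotify_ids: list[str] | None,
-- ) -> list[dict[str, str]]:
--     if not isinstance(data, list):
--         raise RuntimeError("Supabase artists query returned non-list data")
--
--     order = {spotify_id: index for index, spotify_id in enumerate(spotify_ids or [])}
--
--     artists: list[dict[str, str]] = []
--
--     for item in data:
--         if not isinstance(item, dict):
--             continue
--
--         artist_id = item.get("id")
--         spotify_id = item.get("spotify_id")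
--
--         if isinstance(artist_id, str) and isinstance(spotify_id, str):
--             artists.append({"id": artist_id, "spotify_id": spotify_id})
--
--     if spotify_ids is not None:
--         artists.sort(key=lambda artist: order.get(artist["spotify_id"], len(order)))
--
--     return artists
-- ===== SOURCE B (Python) =====
-- def _filter_artist_rows(data, spotify_ids):
--     if not isinstance(data, list):
--         raise RuntimeError("Supabase artists query returned non-list data")
--
--     artists = [
--         {"id": item["id"], "spotify_id": item["spotify_id"]}
--         for item in data
--         if isinstance(item, dict)
--         and isinstance(item.get("id"), str)
--         and isinstance(item.get("spotify_id"), str)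
--     ]
--
--     if spotify_ids is None:
--         return artists
--
--     order = {spotify_id: index for index, spotify_id in enumerate(spotify_ids)}
--     sentinel = len(order)
--     # one stable distribution pass instead of a comparison sort
--     buckets = [[] for _ in range(len(spotify_ids) + 1)]
--     for artist in artists:
--         buckets[order.get(artist["spotify_id"], sentinel)].append(artist)
--     return [artist for bucket in buckets for artist in bucket]
-- ===== Notes on version B (the rewrite author's own statement) =====
-- stated objective: alternative
-- what changed: Replaces the comparison sort by position key with a single stable distribution pass into len(spotify_ids)+1 buckets (bucket index = the order-map position, sentinel bucket for unmatched rows) concatenated in index order; the filtering step becomes a comprehension.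
import Mathlib
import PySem

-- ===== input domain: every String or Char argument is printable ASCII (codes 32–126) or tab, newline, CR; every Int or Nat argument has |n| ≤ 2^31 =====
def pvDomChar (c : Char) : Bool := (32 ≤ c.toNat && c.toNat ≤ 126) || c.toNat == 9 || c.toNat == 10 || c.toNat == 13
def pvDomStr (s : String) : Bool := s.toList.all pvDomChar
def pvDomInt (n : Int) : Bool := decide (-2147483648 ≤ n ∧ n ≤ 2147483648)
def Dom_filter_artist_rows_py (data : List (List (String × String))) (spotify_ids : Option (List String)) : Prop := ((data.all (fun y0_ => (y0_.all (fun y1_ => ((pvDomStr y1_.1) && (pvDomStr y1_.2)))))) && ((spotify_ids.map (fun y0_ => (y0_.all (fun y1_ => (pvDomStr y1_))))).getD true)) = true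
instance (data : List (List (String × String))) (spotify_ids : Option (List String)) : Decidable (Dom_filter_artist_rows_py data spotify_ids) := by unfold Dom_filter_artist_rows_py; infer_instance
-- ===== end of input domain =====

-- ONE-LINE SUMMARY: B replaces A's comparison sort by position key with a stable one-pass
-- distribution into len(spotify_ids)+1 buckets concatenated in index order (same return value).

-- ===== PORT A =====
-- dict lookup item.get(k): assoc list, first match
def pvLookup (item : List (String × String)) (k : String) : Option String :=
  (item.find? (fun p => p.1 == k)).map (·.2)

def filter_artist_rows_py (data : List (List (String × String))) (spotify_ids : Option (List String)) : List (List (String × String)) :=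
  -- order = {spotify_id: index for index, spotify_id in enumerate(spotify_ids or [])}
  let order : PySem.Dict String Int :=
    (PySem.List.enumerate (spotify_ids.getD []) 0).foldl (fun d p => d.insert p.2 p.1) PySem.Dict.empty
  -- the filtering loop (isinstance checks are vacuous under the typed domain: every item is a
  -- dict of strings, so only the presence of both keys is tested)
  let artists : List (List (String × String)) :=
    data.foldl (fun acc item =>
      match pvLookup item "id", pvLookup item "spotify_id" with
      | some aid, some sid => acc ++ [[("id", aid), ("spotify_id", sid)]]
      | _, _ => acc) []
  match spotify_ids with
  | none => artists
  | some _ =>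
      PySem.List.sorted artists
        (fun artist => order.getD ((pvLookup artist "spotify_id").getD "") ((order.size : Int))) false

-- ===== PORT B =====
-- B-side dict lookup item.get(k): assoc list, first match
def pvLookupB (item : List (String × String)) (k : String) : Option String :=
  (item.find? (fun p => p.1 == k)).map (·.2)

def pvRow (item : List (String × String)) : Option (List (String × String)) :=
  (pvLookupB item "id").bind (fun aid =>
    (pvLookupB item "spotify_id").map (fun sid => [("id", aid), ("spotify_id", sid)]))

def filter_artist_rows_py_alt (data : List (List (String × String))) (spotify_ids : Option (List String)) : List (List (String × String)) :=
  let artists := data.filterMap pvRow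
  match spotify_ids with
  | some ids =>
      let order : PySem.Dict String Int :=
        (PySem.List.enumerate ids 0).foldl (fun d p => d.insert p.2 p.1) PySem.Dict.empty
      let sentinel : Int := (order.size : Int)
      let buckets0 := List.replicate (ids.length + 1) ([] : List (List (String × String)))
      let buckets := artists.foldl (fun bs artist =>
        let j := (order.getD ((pvLookupB artist "spotify_id").getD "") sentinel).toNat
        bs.set j (bs.getD j [] ++ [artist])) buckets0
      buckets.flatten
  | none => artists

-- ===== PRECONDITION & SPEC =====
def Spec_filter_artist_rows_py (data : List (List (String × String))) (spotify_ids : Option (List String)) (out : List (List (String × String))) : Prop := out = filter_artist_rows_py_alt data spotify_ids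
instance (data : List (List (String × String))) (spotify_ids : Option (List String)) (out : List (List (String × String))) : Decidable (Spec_filter_artist_rows_py data spotify_ids out) := by unfold Spec_filter_artist_rows_py; infer_instance

-- ===== CLAIM (what is proved, stated in full; the proofs are below) =====
def Claim_equal_filter_artist_rows_py : Prop := ∀ (data : List (List (String × String))) (spotify_ids : Option (List String)), Dom_filter_artist_rows_py data spotify_ids → Spec_filter_artist_rows_py data spotify_ids (filter_artist_rows_py data spotify_ids)

-- ===== LEMMAS AND PROOFS =====

theorem pvLookupB_eq : pvLookupB = pvLookup := rfl

-- A's filtering loop equals B's filterMap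
theorem artists_foldl_eq_filterMap (data : List (List (String × String))) (acc : List (List (String × String))) :
    data.foldl (fun acc item =>
      match pvLookup item "id", pvLookup item "spotify_id" with
      | some aid, some sid => acc ++ [[("id", aid), ("spotify_id", sid)]]
      | _, _ => acc) acc = acc ++ data.filterMap pvRow := by
  induction data generalizing acc with
  | nil => simp
  | cons item rest ih =>
      simp only [List.foldl_cons, List.filterMap_cons]
      cases h1 : pvLookup item "id" <;> cases h2 : pvLookup item "spotify_id" <;>
        simp [pvRow, pvLookupB_eq, h1, h2, ih]

-- insertBy places x after every element it is not 'before' and before those it is 'before'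
theorem insertBy_split {α : Type} (before : α → α → Bool) (x : α) (l1 l2 : List α)
    (h1 : ∀ y ∈ l1, before x y = false) (h2 : ∀ y ∈ l2, before x y = true) :
    PySem.List.insertBy before x (l1 ++ l2) = l1 ++ x :: l2 := by
  induction l1 with
  | nil =>
      cases l2 with
      | nil => simp [PySem.List.insertBy]
      | cons y t => simp [PySem.List.insertBy, h2 y (by simp)]
  | cons y t ih =>
      have hy : before x y = false := h1 y (by simp)
      simp [PySem.List.insertBy, hy, ih (fun z hz => h1 z (by simp [hz])) ]

-- the canonical bucket decomposition by key value
def pvBucketed {α : Type} (key : α → Int) (m : Nat) (xs : List α) : List α :=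
  (List.range m).flatMap (fun k => xs.filter (fun a => (key a).toNat == k))

-- a stable sort by a Nat-bounded nonnegative key is the concatenation of its key buckets
theorem sorted_eq_bucketed {α : Type} (key : α → Int) (m : Nat) (xs : List α)
    (h : ∀ a ∈ xs, 0 ≤ key a ∧ (key a).toNat < m) :
    PySem.List.sorted xs key false = pvBucketed key m xs := by
  induction xs using List.reverseRecOn with
  | nil => simp [pvBucketed, PySem.List.sorted]
  | append_singleton xs x ih =>
      have hx := h x (by simp)
      have hxs : ∀ a ∈ xs, 0 ≤ key a ∧ (key a).toNat < m := fun a ha => h a (by simp [ha])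
      have hsortstep : PySem.List.sorted (xs ++ [x]) key false
          = PySem.List.insertBy (fun a b => decide (key a < key b)) x (PySem.List.sorted xs key false) := by
        rw [PySem.List.sorted_eq_foldl_insertBy, PySem.List.sorted_eq_foldl_insertBy,
          List.foldl_append]
        rfl
      rw [hsortstep, ih hxs]
      set j := (key x).toNat with hj
      have hjm : j < m := hx.2
      -- split the range at j
      have hmsplit : m = (j + 1) + (m - j - 1) := by omega
      have hrange : List.range m = List.range (j+1) ++ (List.range (m - j - 1)).map (fun i => (j+1) + i) := by
        conv_lhs => rw [hmsplit]
        rw [List.range_add]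
      -- the two halves of the bucket decomposition of xs
      set L1 := (List.range (j+1)).flatMap (fun k => xs.filter (fun a => (key a).toNat == k)) with hL1
      set L2 := ((List.range (m - j - 1)).map (fun i => (j+1) + i)).flatMap
          (fun k => xs.filter (fun a => (key a).toNat == k)) with hL2
      have hC : pvBucketed key m xs = L1 ++ L2 := by
        rw [pvBucketed, hrange, List.flatMap_append]
      have hmem1 : ∀ y ∈ L1, (decide (key x < key y)) = false := by
        intro y hy
        rw [hL1, List.mem_flatMap] at hy
        obtain ⟨k, hk, hyf⟩ := hy
        rw [List.mem_filter] at hyf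
        have hkey : (key y).toNat = k := by simpa using hyf.2
        have hk' : k < j + 1 := List.mem_range.mp hk
        have h0y := (hxs y hyf.1).1
        have : key y ≤ key x := by omega
        simp; omega
      have hmem2 : ∀ y ∈ L2, (decide (key x < key y)) = true := by
        intro y hy
        rw [hL2, List.mem_flatMap] at hy
        obtain ⟨k, hk, hyf⟩ := hy
        rw [List.mem_filter] at hyf
        have hkey : (key y).toNat = k := by simpa using hyf.2
        rw [List.mem_map] at hk
        obtain ⟨i, _, hik⟩ := hk
        have h0y := (hxs y hyf.1).1
        have hx0 := hx.1
        simp; omega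
      rw [hC, insertBy_split _ _ _ _ hmem1 hmem2]
      -- now compute pvBucketed of xs ++ [x]
      have hfil : ∀ k, (xs ++ [x]).filter (fun a => (key a).toNat == k)
          = xs.filter (fun a => (key a).toNat == k) ++ (if j = k then [x] else []) := by
        intro k
        rw [List.filter_append, List.filter_singleton, ← hj]
        by_cases hk : j = k <;> simp [Bool.cond_eq_ite, beq_iff_eq, hk]
      rw [pvBucketed, hrange, List.flatMap_append]
      have hB2 : ((List.range (m - j - 1)).map (fun i => (j+1) + i)).flatMap
          (fun k => (xs ++ [x]).filter (fun a => (key a).toNat == k)) = L2 := by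
        rw [hL2]
        apply List.flatMap_congr
        intro k hk
        rw [List.mem_map] at hk
        obtain ⟨i, _, hik⟩ := hk
        rw [hfil k, if_neg (by omega), List.append_nil]
      have hB1 : (List.range (j+1)).flatMap
          (fun k => (xs ++ [x]).filter (fun a => (key a).toNat == k)) = L1 ++ [x] := by
        rw [List.range_succ, List.flatMap_append]
        have hhead : (List.range j).flatMap (fun k => (xs ++ [x]).filter (fun a => (key a).toNat == k))
            = (List.range j).flatMap (fun k => xs.filter (fun a => (key a).toNat == k)) := by
          apply List.flatMap_congr
          intro k hk
          rw [List.mem_range] at hk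
          rw [hfil k, if_neg (by omega), List.append_nil]
        rw [hhead, hL1, List.range_succ, List.flatMap_append]
        simp [List.append_assoc, ← hj]
      rw [hB1, hB2]
      simp

-- the bucket-distribution loop computes the canonical decomposition
theorem foldl_buckets_eq {α : Type} (key : α → Int) (xs : List α) (bs : List (List α))
    (h : ∀ a ∈ xs, (key a).toNat < bs.length) :
    xs.foldl (fun bs a => bs.set (key a).toNat (bs.getD (key a).toNat [] ++ [a])) bs
      = (List.range bs.length).map (fun k => bs.getD k [] ++ xs.filter (fun a => (key a).toNat == k)) := by
  induction xs generalizing bs with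
  | nil =>
      simp only [List.foldl_nil, List.filter_nil, List.append_nil]
      refine (List.ext_getElem (by simp) ?_).symm
      intro i h1 h2
      simp [List.getD_eq_getElem?_getD, List.getElem?_eq_getElem h2]
  | cons a xs ih =>
      have hjb : (key a).toNat < bs.length := h a (by simp)
      rw [List.foldl_cons,
        ih _ (by intro b hb; rw [List.length_set]; exact h b (by simp [hb]))]
      rw [List.length_set]
      apply List.map_congr_left
      intro k hk
      rw [List.mem_range] at hk
      by_cases hkj : (key a).toNat = k
      · rw [List.filter_cons, List.getD_eq_getElem?_getD, List.getElem?_set,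
          if_pos hkj, if_pos hjb]
        simp [hkj, List.getD_eq_getElem?_getD]
      · rw [List.filter_cons, List.getD_eq_getElem?_getD, List.getElem?_set,
          if_neg hkj]
        simp [hkj, List.getD_eq_getElem?_getD]

theorem buckets_flatten {α : Type} (key : α → Int) (m : Nat) (xs : List α)
    (h : ∀ a ∈ xs, (key a).toNat < m) :
    (xs.foldl (fun bs a => bs.set (key a).toNat (bs.getD (key a).toNat [] ++ [a]))
        (List.replicate m ([] : List α))).flatten = pvBucketed key m xs := by
  rw [foldl_buckets_eq key xs _ (by simpa using h)]
  rw [pvBucketed]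
  simp [List.flatMap]

-- bound on the values stored by the order-building loop
theorem order_get_bound (l : List (Int × String)) (d : PySem.Dict String Int)
    (P : Int → Prop)
    (hd : ∀ k v, d.get? k = some v → P v) (hl : ∀ p ∈ l, P p.1) :
    ∀ k v, (l.foldl (fun d p => d.insert p.2 p.1) d).get? k = some v → P v := by
  induction l generalizing d with
  | nil => exact hd
  | cons p rest ih =>
      intro k v hv
      refine ih (d.insert p.2 p.1) ?_ (fun q hq => hl q (by simp [hq])) k v hv
      intro k' v' h'
      rw [PySem.Dict.get?_insert] at h'
      split at h'
      · cases h'; exact hl p (by simp)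
      · exact hd k' v' h'

-- each inserted order value is an enumerate index, hence in [0, len)
theorem order_values_in_range (ids : List String) :
    ∀ k v, ((PySem.List.enumerate ids 0).foldl (fun d p => d.insert p.2 p.1)
        (PySem.Dict.empty : PySem.Dict String Int)).get? k = some v →
      0 ≤ v ∧ v < (ids.length : Int) := by
  refine order_get_bound _ _ (fun v => 0 ≤ v ∧ v < (ids.length : Int)) ?_ ?_
  · intro k v hv
    rw [PySem.Dict.get?_empty] at hv
    cases hv
  · intro p hp
    rw [PySem.List.mem_enumerate_iff] at hp
    obtain ⟨k, hk, rfl⟩ := hp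
    constructor <;> [omega; (push_cast; omega)]

theorem size_insert_le {κ ν : Type} [BEq κ] (d : PySem.Dict κ ν) (k : κ) (v : ν) :
    (d.insert k v).size ≤ d.size + 1 := by
  simp only [PySem.Dict.size, PySem.Dict.items_insert]
  split <;> simp

theorem size_foldl_insert_le (l : List (Int × String)) (d : PySem.Dict String Int) :
    (l.foldl (fun d p => d.insert p.2 p.1) d).size ≤ d.size + l.length := by
  induction l generalizing d with
  | nil => simp
  | cons p rest ih =>
      calc (List.foldl (fun d p => d.insert p.2 p.1) (d.insert p.2 p.1) rest).size
          ≤ (d.insert p.2 p.1).size + rest.length := ih _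
        _ ≤ d.size + (p :: rest).length := by
              have := size_insert_le d p.2 p.1
              simp only [List.length_cons]
              omega

-- the sort key of both ports is nonnegative and at most len(ids)
theorem key_bounds (ids : List String) (sid : String) :
    0 ≤ (((PySem.List.enumerate ids 0).foldl (fun d p => d.insert p.2 p.1)
        (PySem.Dict.empty : PySem.Dict String Int)).getD sid
        ((((PySem.List.enumerate ids 0).foldl (fun d p => d.insert p.2 p.1)
        (PySem.Dict.empty : PySem.Dict String Int)).size : Int))) ∧
      ((((PySem.List.enumerate ids 0).foldl (fun d p => d.insert p.2 p.1)
        (PySem.Dict.empty : PySem.Dict String Int)).getD sid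
        ((((PySem.List.enumerate ids 0).foldl (fun d p => d.insert p.2 p.1)
        (PySem.Dict.empty : PySem.Dict String Int)).size : Int)))).toNat < ids.length + 1 := by
  set order := (PySem.List.enumerate ids 0).foldl (fun d p => d.insert p.2 p.1)
    (PySem.Dict.empty : PySem.Dict String Int) with horder
  have hsize : order.size ≤ ids.length := by
    have h1 := size_foldl_insert_le (PySem.List.enumerate ids 0) PySem.Dict.empty
    have h2 : (PySem.List.enumerate ids 0).length = ids.length := PySem.List.length_enumerate ids 0
    have h3 : (PySem.Dict.empty : PySem.Dict String Int).size = 0 := by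
      simp [PySem.Dict.size, PySem.Dict.empty]
    rw [horder]
    omega
  rw [PySem.Dict.getD_eq_get?_getD]
  cases hg : order.get? sid with
  | none =>
      simp only [Option.getD]
      constructor
      · positivity
      · omega
  | some v =>
      have hv := order_values_in_range ids sid v hg
      simp only [Option.getD]
      omega

-- ===== VERDICT (by name: the statement is the Claim_ definition above) =====
theorem filter_artist_rows_py_spec : Claim_equal_filter_artist_rows_py := by
  intro data spotify_ids _
  unfold Spec_filter_artist_rows_py filter_artist_rows_py filter_artist_rows_py_alt
  cases spotify_ids with
  | none =>
      simp [artists_foldl_eq_filterMap data []]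
  | some ids =>
      simp only [Option.getD_some, artists_foldl_eq_filterMap data [], List.nil_append,
        pvLookupB_eq]
      have hb : ∀ a ∈ data.filterMap pvRow,
          0 ≤ (((PySem.List.enumerate ids 0).foldl (fun d p => d.insert p.2 p.1)
              (PySem.Dict.empty : PySem.Dict String Int)).getD ((pvLookup a "spotify_id").getD "")
              ((((PySem.List.enumerate ids 0).foldl (fun d p => d.insert p.2 p.1)
              (PySem.Dict.empty : PySem.Dict String Int)).size : Int))) ∧
            ((((PySem.List.enumerate ids 0).foldl (fun d p => d.insert p.2 p.1)
              (PySem.Dict.empty : PySem.Dict String Int)).getD ((pvLookup a "spotify_id").getD "")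
              ((((PySem.List.enumerate ids 0).foldl (fun d p => d.insert p.2 p.1)
              (PySem.Dict.empty : PySem.Dict String Int)).size : Int)))).toNat < ids.length + 1 :=
        fun a _ => key_bounds ids ((pvLookup a "spotify_id").getD "")
      rw [sorted_eq_bucketed _ (ids.length + 1) _ hb,
        buckets_flatten _ (ids.length + 1) _ (fun a ha => (hb a ha).2)]
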